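-- pv_equiv track=rewrite | github.com/ChrisCheng816/UMLKnowledgeConflict | balance.py | build_required_pairs
-- ===== SOURCE A (Python) =====
-- def build_required_pairs(lines):
--     required = []
--     seen = set()
--     for line in lines:
--         line = line.strip()
--         if not line:
--             continue
--         parts = line.split()
--         if len(parts) < 3:
--             continue
--         ab = f"{parts[0]} {parts[1]}"
--         bc = f"{parts[1]} {parts[2]}"
--         if ab not in seen:
--             seen.add(ab)
--             required.append(ab)
--         if bc not in seen:
--             seen.add(bc)
--             required.append(bc)
--     return required
-- ===== SOURCE B (Python) =====
-- def build_required_pairs(lines):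
--     # Right-to-left fold: result always equals the answer for the suffix of lines
--     # processed so far; a line's pairs are prepended and displace later duplicates.
--     result = []
--     for line in reversed(lines):
--         parts = line.split()
--         if len(parts) < 3:
--             continue
--         ab = parts[0] + " " + parts[1]
--         bc = parts[1] + " " + parts[2]
--         head = [ab] if bc == ab else [ab, bc]
--         result = head + [p for p in result if p not in head]
--     return result
-- ===== Notes on version B (the rewrite author's own statement) =====
-- stated objective: alternative
-- what changed: B traverses the lines back-to-front with an accumulator that is always the finished answer for the suffix seen so far: each line's (locally deduped) pair list is prepended and later duplicates are filtered out, so the explicit seen set and the strip/blank pre-checks disappear (split() already yields no parts on blank lines).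
import Mathlib
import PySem

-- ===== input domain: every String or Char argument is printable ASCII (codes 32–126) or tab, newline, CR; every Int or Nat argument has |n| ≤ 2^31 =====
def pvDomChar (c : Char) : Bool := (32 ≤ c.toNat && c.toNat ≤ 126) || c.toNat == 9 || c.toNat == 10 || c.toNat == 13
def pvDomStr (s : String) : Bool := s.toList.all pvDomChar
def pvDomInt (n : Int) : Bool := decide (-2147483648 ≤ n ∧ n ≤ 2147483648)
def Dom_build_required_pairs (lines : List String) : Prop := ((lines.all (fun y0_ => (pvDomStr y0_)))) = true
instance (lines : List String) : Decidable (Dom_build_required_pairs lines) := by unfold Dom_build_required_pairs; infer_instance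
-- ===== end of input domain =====

-- B folds the lines back-to-front, keeping as accumulator the finished answer for the processed suffix (no seen set, no strip); same return value as A.


-- ===== PORT A =====
-- loop body of A (one iteration of 'for line in lines')
def buildStepA (st : PySem.Set String × List String) (line : String) : PySem.Set String × List String :=
  let line := PySem.Str.strip line
  if line = "" then st
  else
    let parts := PySem.Str.split₀ line
    if parts.length < 3 then st
    else
      let ab := PySem.Str.join " " [PySem.List.pyGetD parts 0 "", PySem.List.pyGetD parts 1 ""]
      let bc := PySem.Str.join " " [PySem.List.pyGetD parts 1 "", PySem.List.pyGetD parts 2 ""]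
      let st := if PySem.Set.contains st.1 ab then st else (PySem.Set.add st.1 ab, st.2 ++ [ab])
      if PySem.Set.contains st.1 bc then st else (PySem.Set.add st.1 bc, st.2 ++ [bc])

def build_required_pairs (lines : List String) : List String :=
  (lines.foldl buildStepA ((PySem.Set.empty : PySem.Set String), ([] : List String))).2

-- ===== PORT B =====
-- loop body of B (one iteration of 'for line in reversed(lines)')
def buildStepB (result : List String) (line : String) : List String :=
  let parts := PySem.Str.split₀ line
  if parts.length < 3 then result
  else
    let ab := PySem.Str.join " " [PySem.List.pyGetD parts 0 "", PySem.List.pyGetD parts 1 ""]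
    let bc := PySem.Str.join " " [PySem.List.pyGetD parts 1 "", PySem.List.pyGetD parts 2 ""]
    let head := if bc = ab then [ab] else [ab, bc]
    head ++ result.filter (fun p => !(head.contains p))

def build_required_pairs_alt (lines : List String) : List String :=
  lines.reverse.foldl buildStepB []

-- ===== PRECONDITION & SPEC =====
def Spec_build_required_pairs (lines : List String) (out : List String) : Prop := out = build_required_pairs_alt lines
instance (lines : List String) (out : List String) : Decidable (Spec_build_required_pairs lines out) := by unfold Spec_build_required_pairs; infer_instance

-- ===== CLAIM (what is proved, stated in full; the proofs are below) =====
def Claim_equal_build_required_pairs : Prop := ∀ (lines : List String), Dom_build_required_pairs lines → Spec_build_required_pairs lines (build_required_pairs lines)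

-- ===== LEMMAS AND PROOFS =====

-- the pairs one line contributes, in A's (strip-first) phrasing (proof-only helper)
def pvCandLine (line : String) : List String :=
  let line := PySem.Str.strip line
  if line = "" then []
  else
    let parts := PySem.Str.split₀ line
    if parts.length < 3 then []
    else [PySem.Str.join " " [PySem.List.pyGetD parts 0 "", PySem.List.pyGetD parts 1 ""],
          PySem.Str.join " " [PySem.List.pyGetD parts 1 "", PySem.List.pyGetD parts 2 ""]]

-- ---- A's fold equals foldl Set.add over the flattened candidates ----

theorem pvStepA_eq (s : PySem.Set String) (line : String) :
    buildStepA (s, s) line = ((pvCandLine line).foldl PySem.Set.add s, (pvCandLine line).foldl PySem.Set.add s) := by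
  simp only [buildStepA, pvCandLine, PySem.Set.add]
  split_ifs <;> simp_all [List.foldl, PySem.Set.add]

theorem pvFoldA_eq (lines : List String) (s : PySem.Set String) :
    lines.foldl buildStepA (s, s)
      = ((lines.flatMap pvCandLine).foldl PySem.Set.add s, (lines.flatMap pvCandLine).foldl PySem.Set.add s) := by
  induction lines generalizing s with
  | nil => simp
  | cons l ls ih =>
      simp only [List.foldl_cons, List.flatMap_cons, List.foldl_append]
      rw [pvStepA_eq]
      exact ih _

-- ---- split₀ ignores leading/trailing whitespace, so B may skip A's strip/blank check ----

theorem pvGoSpace (ws : List Char) (h : ∀ c ∈ ws, PySem.Chars.isspace c = true)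
    (cur : List Char) (acc : List (List Char)) :
    PySem.Chars.split₀.go ws cur acc = PySem.Chars.split₀.go [] cur acc := by
  induction ws generalizing cur acc with
  | nil => rfl
  | cons c cs ih =>
      have hc : PySem.Chars.isspace c = true := h c (by simp)
      have hcs : ∀ x ∈ cs, PySem.Chars.isspace x = true := fun x hx => h x (by simp [hx])
      simp only [PySem.Chars.split₀.go, hc]
      by_cases hcur : cur.isEmpty = true
      · simp only [hcur]
        rw [ih hcs]
        have : cur = [] := List.isEmpty_iff.mp hcur
        subst this; rfl
      · simp [hcur, ih hcs, PySem.Chars.split₀.go]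

theorem pvGoAppendSpace (xs ws : List Char) (h : ∀ c ∈ ws, PySem.Chars.isspace c = true)
    (cur : List Char) (acc : List (List Char)) :
    PySem.Chars.split₀.go (xs ++ ws) cur acc = PySem.Chars.split₀.go xs cur acc := by
  induction xs generalizing cur acc with
  | nil => simpa using pvGoSpace ws h cur acc
  | cons c cs ih =>
      simp only [List.cons_append, PySem.Chars.split₀.go]
      by_cases hc : PySem.Chars.isspace c = true
      · simp only [hc]
        by_cases hcur : cur.isEmpty = true <;> simp [hcur, ih]
      · simp [hc, ih]

theorem pvGoDropWhile (xs : List Char) (acc : List (List Char)) :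
    PySem.Chars.split₀.go (List.dropWhile PySem.Chars.isspace xs) [] acc
      = PySem.Chars.split₀.go xs [] acc := by
  induction xs generalizing acc with
  | nil => rfl
  | cons c cs ih =>
      by_cases hc : PySem.Chars.isspace c = true
      · rw [List.dropWhile_cons_of_pos hc]
        rw [ih]
        simp [PySem.Chars.split₀.go, hc]
      · rw [List.dropWhile_cons_of_neg (by simp [hc])]

theorem pvCharsSplitStrip (s : List Char) :
    PySem.Chars.split₀ (PySem.Chars.strip s) = PySem.Chars.split₀ s := by
  unfold PySem.Chars.split₀ PySem.Chars.strip PySem.Chars.rstrip PySem.Chars.lstrip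
  set t := List.dropWhile PySem.Chars.isspace s with ht
  have hdecomp : t = (List.dropWhile PySem.Chars.isspace t.reverse).reverse
      ++ (List.takeWhile PySem.Chars.isspace t.reverse).reverse := by
    rw [← List.reverse_append, List.takeWhile_append_dropWhile, List.reverse_reverse]
  have hws : ∀ c ∈ (List.takeWhile PySem.Chars.isspace t.reverse).reverse, PySem.Chars.isspace c = true := by
    intro c hc
    rw [List.mem_reverse] at hc
    exact List.mem_takeWhile_imp hc
  calc PySem.Chars.split₀.go (List.dropWhile PySem.Chars.isspace t.reverse).reverse [] []
      = PySem.Chars.split₀.go ((List.dropWhile PySem.Chars.isspace t.reverse).reverse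
          ++ (List.takeWhile PySem.Chars.isspace t.reverse).reverse) [] [] := (pvGoAppendSpace _ _ hws [] []).symm
    _ = PySem.Chars.split₀.go t [] [] := by rw [← hdecomp]
    _ = PySem.Chars.split₀.go s [] [] := pvGoDropWhile s []

theorem pvStrSplitStrip (line : String) :
    PySem.Str.split₀ (PySem.Str.strip line) = PySem.Str.split₀ line := by
  unfold PySem.Str.split₀ PySem.Str.strip
  rw [show (String.ofList (PySem.Chars.strip line.toList)).toList = PySem.Chars.strip line.toList from by simp]
  rw [pvCharsSplitStrip]

-- ---- incremental dedup: folding Set.add from s appends the new elements, filtered ----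

theorem pvFoldAdd (ys : List String) (s : PySem.Set String) :
    ys.foldl PySem.Set.add s
      = s ++ (ys.foldl PySem.Set.add []).filter (fun p => !(s.contains p)) := by
  induction ys generalizing s with
  | nil => simp
  | cons y ys ih =>
      simp only [List.foldl_cons]
      rw [ih (PySem.Set.add s y), ih (PySem.Set.add [] y)]
      have hadd0 : PySem.Set.add ([] : PySem.Set String) y = [y] := by
        simp [PySem.Set.add]
      rw [hadd0]
      by_cases hy : y ∈ s
      · have hs : PySem.Set.add s y = s := by
          simp [PySem.Set.add, PySem.Set.contains, hy]
        rw [hs]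
        have h1 : List.filter (fun p => !(s.contains p)) [y] = [] := by simp [hy]
        simp only [List.filter_append, h1, List.nil_append, List.filter_filter]
        congr 1
        apply List.filter_congr
        intro p _
        by_cases hp : p = y
        · subst hp; simp [hy]
        · simp [hp, PySem.Set.contains]
      · have hs : PySem.Set.add s y = s ++ [y] := by
          simp [PySem.Set.add, PySem.Set.contains, hy]
        rw [hs]
        have h1 : List.filter (fun p => !(s.contains p)) [y] = [y] := by simp [hy]
        simp only [List.filter_append, h1, List.filter_filter, List.append_assoc]
        congr 2
        apply List.filter_congr
        intro p _
        by_cases hp : p = y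
        · subst hp; simp [PySem.Set.contains, hy]
        · simp [hp, PySem.Set.contains]

-- ---- B's loop body, in terms of pvCandLine ----

theorem pvStepB_eq (acc : List String) (line : String) :
    buildStepB acc line
      = (pvCandLine line).foldl PySem.Set.add []
          ++ acc.filter (fun p => !(((pvCandLine line).foldl PySem.Set.add []).contains p)) := by
  have hsplit : PySem.Str.split₀ line = PySem.Str.split₀ (PySem.Str.strip line) :=
    (pvStrSplitStrip line).symm
  unfold buildStepB pvCandLine
  by_cases hblank : PySem.Str.strip line = ""
  · have h0 : PySem.Str.split₀ line = [] := by
      rw [hsplit, hblank]; rfl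
    simp [hblank, h0]
  · rw [hsplit]
    simp only [hblank]
    by_cases hlen : (PySem.Str.split₀ (PySem.Str.strip line)).length < 3
    · simp [hlen]
    · simp only [hlen]
      generalize PySem.Str.join " " [PySem.List.pyGetD (PySem.Str.split₀ (PySem.Str.strip line)) 0 "",
        PySem.List.pyGetD (PySem.Str.split₀ (PySem.Str.strip line)) 1 ""] = ab
      generalize PySem.Str.join " " [PySem.List.pyGetD (PySem.Str.split₀ (PySem.Str.strip line)) 1 "",
        PySem.List.pyGetD (PySem.Str.split₀ (PySem.Str.strip line)) 2 ""] = bc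
      by_cases h : bc = ab <;>
        simp [h, List.foldl, PySem.Set.add, PySem.Set.contains]

-- ---- B's fold equals foldl Set.add over the flattened candidates ----

theorem pvFoldB_eq (lines : List String) :
    lines.foldr (fun l acc => buildStepB acc l) []
      = (lines.flatMap pvCandLine).foldl PySem.Set.add [] := by
  induction lines with
  | nil => rfl
  | cons l ls ih =>
      simp only [List.foldr_cons, List.flatMap_cons, List.foldl_append]
      rw [ih, pvStepB_eq]
      exact (pvFoldAdd _ _).symm

-- ===== VERDICT (by name: the statement is the Claim_ definition above) =====
theorem build_required_pairs_spec : Claim_equal_build_required_pairs := by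
  intro lines _
  unfold Spec_build_required_pairs build_required_pairs build_required_pairs_alt
  rw [show (PySem.Set.empty : PySem.Set String) = ([] : PySem.Set String) from rfl, pvFoldA_eq]
  rw [List.foldl_reverse]
  exact (pvFoldB_eq lines).symm
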